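-- pv_equiv track=rewrite | github.com/webclinic017/fa-absa-py3 | Python modules/PS_TradeFees.py | _SlidingScaleFeePerContract
-- ===== SOURCE A (Python) =====
-- def _SlidingScaleFeePerContract(scalesDict, feeAbove, qty):
--     """
--         Determines the fee per contract for sliding scale
--         methodology given a dictionary of upper boundaries -> fees
--         and quantity of the trade.
--         For all quantities above the max boundary in the dictionary
--         feeAbove is used as fee per contract.
--     """
--     found = 0
--     qty = abs(qty)
--     for bucketCap in sorted(scalesDict.keys()):
--         if qty <= bucketCap:
--             found = 1
--             break
--     if found:
--         feePerContract = scalesDict[bucketCap]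
--     else:
--         feePerContract = feeAbove
--     return feePerContract
-- ===== SOURCE B (Python) =====
-- def _SlidingScaleFeePerContract(scalesDict, feeAbove, qty):
--     """One-pass minimum scan: track the smallest bucket cap >= |qty| seen so far
--     and its fee, instead of sorting the keys and scanning for the first hit."""
--     q = abs(qty)
--     best = None
--     fee = feeAbove
--     for cap, capFee in scalesDict.items():
--         if q <= cap and (best is None or cap < best):
--             best = cap
--             fee = capFee
--     return fee
-- ===== Notes on version B (the rewrite author's own statement) =====
-- stated objective: faster
-- what changed: Replaces sort-the-keys-then-linear-scan-for-the-first-cap->=-qty with a single unsorted pass over the dict items that tracks the minimal eligible cap and its fee.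
import Mathlib
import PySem

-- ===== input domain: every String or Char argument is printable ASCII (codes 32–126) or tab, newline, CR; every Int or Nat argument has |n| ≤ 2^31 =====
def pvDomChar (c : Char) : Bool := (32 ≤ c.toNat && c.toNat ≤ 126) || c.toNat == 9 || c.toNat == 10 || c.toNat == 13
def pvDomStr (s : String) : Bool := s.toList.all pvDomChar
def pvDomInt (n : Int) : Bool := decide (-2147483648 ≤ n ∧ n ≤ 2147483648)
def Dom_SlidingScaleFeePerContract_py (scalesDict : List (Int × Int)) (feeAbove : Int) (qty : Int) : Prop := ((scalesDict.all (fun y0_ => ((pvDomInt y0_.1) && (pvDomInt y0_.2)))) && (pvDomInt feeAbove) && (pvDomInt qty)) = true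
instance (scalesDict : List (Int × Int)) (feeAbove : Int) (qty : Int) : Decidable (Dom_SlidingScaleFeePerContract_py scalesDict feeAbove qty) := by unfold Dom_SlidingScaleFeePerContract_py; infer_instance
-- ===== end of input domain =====

-- B replaces A's sort-the-keys-then-scan-for-the-first-cap-≥-qty with a single
-- unsorted pass over the dict items tracking the minimal eligible cap and its fee.

-- ===== PORT A =====
-- the 'for bucketCap in sorted(...): if qty <= bucketCap: found = 1; break' loop:
-- Option Int carries (found, bucketCap)
def pyFindCap (q : Int) : List Int → Option Int
  | [] => none
  | k :: ks => if q ≤ k then some k else pyFindCap q ks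

def SlidingScaleFeePerContract_py (scalesDict : List (Int × Int)) (feeAbove : Int) (qty : Int) : Int :=
  let d := PySem.Dict.ofList scalesDict
  let q := |qty|
  match pyFindCap q (PySem.List.sorted d.keys (fun k => k) false) with
  | some bucketCap => d.getD bucketCap 0   -- scalesDict[bucketCap]; bucketCap is drawn from d.keys, so the lookup never raises
  | none => feeAbove

-- ===== PORT B =====
-- loop body of Source B: state = (best, fee)
def altStep (q : Int) (st : Option Int × Int) (kv : Int × Int) : Option Int × Int :=
  match st with
  | (none, fee) => if q ≤ kv.1 then (some kv.1, kv.2) else (none, fee)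
  | (some b, fee) => if q ≤ kv.1 ∧ kv.1 < b then (some kv.1, kv.2) else (some b, fee)

def SlidingScaleFeePerContract_py_alt (scalesDict : List (Int × Int)) (feeAbove : Int) (qty : Int) : Int :=
  let d := PySem.Dict.ofList scalesDict
  let q := |qty|
  (d.items.foldl (altStep q) (none, feeAbove)).2

-- ===== PRECONDITION & SPEC =====
def Spec_SlidingScaleFeePerContract_py (scalesDict : List (Int × Int)) (feeAbove : Int) (qty : Int) (out : Int) : Prop := out = SlidingScaleFeePerContract_py_alt scalesDict feeAbove qty
instance (scalesDict : List (Int × Int)) (feeAbove : Int) (qty : Int) (out : Int) : Decidable (Spec_SlidingScaleFeePerContract_py scalesDict feeAbove qty out) := by unfold Spec_SlidingScaleFeePerContract_py; infer_instance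

-- ===== CLAIM (what is proved, stated in full; the proofs are below) =====
def Claim_equal_SlidingScaleFeePerContract_py : Prop := ∀ (scalesDict : List (Int × Int)) (feeAbove : Int) (qty : Int), Dom_SlidingScaleFeePerContract_py scalesDict feeAbove qty → Spec_SlidingScaleFeePerContract_py scalesDict feeAbove qty (SlidingScaleFeePerContract_py scalesDict feeAbove qty)

-- ===== LEMMAS AND PROOFS =====

-- proof-side spec: the first pair attaining the minimal key ≥ q, if any
def pickMin (q : Int) : List (Int × Int) → Option (Int × Int)
  | [] => none
  | p :: t =>
    if q ≤ p.1 then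
      match pickMin q t with
      | some m => if m.1 < p.1 then some m else some p
      | none => some p
    else pickMin q t

theorem foldl_altStep_some (q : Int) : ∀ (L : List (Int × Int)) (b fb : Int),
    L.foldl (altStep q) (some b, fb) =
      match pickMin q L with
      | some m => if m.1 < b then (some m.1, m.2) else (some b, fb)
      | none => (some b, fb) := by
  intro L
  induction L with
  | nil => intro b fb; rfl
  | cons p t ih =>
    intro b fb
    simp only [List.foldl_cons, altStep, pickMin]
    by_cases hq : q ≤ p.1
    · rw [if_pos hq]
      by_cases hb : p.1 < b
      · rw [if_pos ⟨hq, hb⟩, ih]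
        cases hm : pickMin q t with
        | none => dsimp only; simp [hb]
        | some m =>
          dsimp only
          by_cases hmk : m.1 < p.1
          · have hmb : m.1 < b := lt_trans hmk hb
            simp [hmk, hmb]
          · simp [hmk, hb]
      · rw [if_neg (by tauto : ¬ (q ≤ p.1 ∧ p.1 < b)), ih]
        cases hm : pickMin q t with
        | none => dsimp only; simp [hb]
        | some m =>
          dsimp only
          by_cases hmk : m.1 < p.1
          · simp [hmk]
          · have hmb : ¬ m.1 < b := by omega
            simp [hmk, hmb, hb]
    · rw [if_neg hq, if_neg (by tauto : ¬ (q ≤ p.1 ∧ p.1 < b)), ih]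

theorem foldl_altStep_none (q : Int) : ∀ (L : List (Int × Int)) (f0 : Int),
    L.foldl (altStep q) (none, f0) =
      match pickMin q L with
      | some m => (some m.1, m.2)
      | none => (none, f0) := by
  intro L
  induction L with
  | nil => intro f0; rfl
  | cons p t ih =>
    intro f0
    simp only [List.foldl_cons, altStep, pickMin]
    by_cases hq : q ≤ p.1
    · rw [if_pos hq, if_pos hq, foldl_altStep_some q t]
      cases hm : pickMin q t with
      | none => dsimp only
      | some m =>
        dsimp only
        by_cases hmk : m.1 < p.1 <;> simp [hmk]
    · rw [if_neg hq, if_neg hq, ih]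

theorem pickMin_eq_none (q : Int) : ∀ (L : List (Int × Int)),
    pickMin q L = none ↔ ∀ p ∈ L, p.1 < q := by
  intro L
  induction L with
  | nil => simp [pickMin]
  | cons p t ih =>
    simp only [pickMin, List.mem_cons]
    by_cases hq : q ≤ p.1
    · rw [if_pos hq]
      have hr : ¬ ∀ x : Int × Int, x = p ∨ x ∈ t → x.1 < q :=
        fun h => absurd (h p (Or.inl rfl)) (by omega)
      cases hm : pickMin q t with
      | none => dsimp only; exact iff_of_false (by simp) hr
      | some m =>
        dsimp only
        by_cases hmk : m.1 < p.1
        · rw [if_pos hmk]; exact iff_of_false (by simp) hr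
        · rw [if_neg hmk]; exact iff_of_false (by simp) hr
    · rw [if_neg hq, ih]
      constructor
      · intro h x hx
        rcases hx with rfl | hx
        · omega
        · exact h x hx
      · intro h x hx; exact h x (Or.inr hx)

theorem pickMin_spec (q : Int) : ∀ (L : List (Int × Int)) (m : Int × Int),
    pickMin q L = some m → m ∈ L ∧ q ≤ m.1 ∧ ∀ p ∈ L, q ≤ p.1 → m.1 ≤ p.1 := by
  intro L
  induction L with
  | nil => intro m h; simp [pickMin] at h
  | cons p t ih =>
    intro m h
    simp only [pickMin] at h
    by_cases hq : q ≤ p.1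
    · rw [if_pos hq] at h
      cases hm : pickMin q t with
      | none =>
        rw [hm] at h
        dsimp only at h
        cases h
        have hall := (pickMin_eq_none q t).1 hm
        refine ⟨List.mem_cons_self, hq, ?_⟩
        intro x hx hxq
        rcases List.mem_cons.1 hx with rfl | hx
        · omega
        · exact absurd hxq (by have := hall x hx; omega)
      | some m' =>
        rw [hm] at h
        dsimp only at h
        obtain ⟨hmem, hge, hmin⟩ := ih m' hm
        by_cases hmk : m'.1 < p.1
        · rw [if_pos hmk] at h
          cases h
          refine ⟨List.mem_cons_of_mem _ hmem, hge, ?_⟩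
          intro x hx hxq
          rcases List.mem_cons.1 hx with rfl | hx
          · omega
          · exact hmin x hx hxq
        · rw [if_neg hmk] at h
          cases h
          refine ⟨List.mem_cons_self, hq, ?_⟩
          intro x hx hxq
          rcases List.mem_cons.1 hx with rfl | hx
          · omega
          · have := hmin x hx hxq; omega
    · rw [if_neg hq] at h
      obtain ⟨hmem, hge, hmin⟩ := ih m h
      refine ⟨List.mem_cons_of_mem _ hmem, hge, ?_⟩
      intro x hx hxq
      rcases List.mem_cons.1 hx with rfl | hx
      · omega
      · exact hmin x hx hxq

theorem pyFindCap_eq_none (q : Int) : ∀ (S : List Int),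
    pyFindCap q S = none ↔ ∀ k ∈ S, k < q := by
  intro S
  induction S with
  | nil => simp [pyFindCap]
  | cons k t ih =>
    simp only [pyFindCap, List.mem_cons]
    by_cases hq : q ≤ k
    · rw [if_pos hq]
      exact iff_of_false (by simp) (fun h => absurd (h k (Or.inl rfl)) (by omega))
    · rw [if_neg hq, ih]
      constructor
      · intro h x hx
        rcases hx with rfl | hx
        · omega
        · exact h x hx
      · intro h x hx; exact h x (Or.inr hx)

theorem pyFindCap_spec (q : Int) : ∀ (S : List Int), S.Pairwise (· ≤ ·) → ∀ c,
    pyFindCap q S = some c → c ∈ S ∧ q ≤ c ∧ ∀ k ∈ S, q ≤ k → c ≤ k := by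
  intro S
  induction S with
  | nil => intro _ c h; simp [pyFindCap] at h
  | cons k t ih =>
    intro hpw c h
    rw [List.pairwise_cons] at hpw
    simp only [pyFindCap] at h
    by_cases hq : q ≤ k
    · rw [if_pos hq] at h
      cases h
      refine ⟨List.mem_cons_self, hq, ?_⟩
      intro x hx _
      rcases List.mem_cons.1 hx with rfl | hx
      · omega
      · exact hpw.1 x hx
    · rw [if_neg hq] at h
      obtain ⟨hmem, hge, hmin⟩ := ih hpw.2 c h
      refine ⟨List.mem_cons_of_mem _ hmem, hge, ?_⟩
      intro x hx hxq
      rcases List.mem_cons.1 hx with rfl | hx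
      · omega
      · exact hmin x hx hxq

-- A's sorted-scan-then-lookup equals B's one-pass minimum scan, for any dict with distinct keys
theorem bridge (d : PySem.Dict Int Int) (hnd : d.keys.Nodup) (q fee : Int) :
    (match pyFindCap q (PySem.List.sorted d.keys (fun k => k) false) with
     | some bucketCap => d.getD bucketCap 0
     | none => fee) = (d.items.foldl (altStep q) (none, fee)).2 := by
  have hkeys : ∀ k, k ∈ d.keys ↔ ∃ p ∈ d.items, p.1 = k := by
    intro k
    simp only [PySem.Dict.keys, List.mem_map]
  have hsortmem : ∀ k, k ∈ PySem.List.sorted d.keys (fun k => k) false ↔ k ∈ d.keys := by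
    intro k; exact PySem.List.mem_sorted _ _ _ _
  rw [foldl_altStep_none]
  cases hf : pyFindCap q (PySem.List.sorted d.keys (fun k => k) false) with
  | none =>
    have hall := (pyFindCap_eq_none q _).1 hf
    have hpm : pickMin q d.items = none := by
      rw [pickMin_eq_none]
      intro p hp
      exact hall p.1 ((hsortmem p.1).2 ((hkeys p.1).2 ⟨p, hp, rfl⟩))
    rw [hpm]
  | some c =>
    have hpw : (PySem.List.sorted d.keys (fun k => k) false).Pairwise (· ≤ ·) :=
      PySem.List.sorted_pairwise d.keys (fun k => k)
    obtain ⟨hcmem, hcge, hcmin⟩ := pyFindCap_spec q _ hpw c hf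
    obtain ⟨pc, hpc, hpck⟩ := (hkeys c).1 ((hsortmem c).1 hcmem)
    cases hm : pickMin q d.items with
    | none =>
      exact absurd (show q ≤ pc.1 by rw [hpck]; exact hcge)
        (by have := (pickMin_eq_none q _).1 hm pc hpc; omega)
    | some m =>
      obtain ⟨hmmem, hmge, hmmin⟩ := pickMin_spec q _ m hm
      have h1 : c ≤ m.1 :=
        hcmin m.1 ((hsortmem m.1).2 ((hkeys m.1).2 ⟨m, hmmem, rfl⟩)) hmge
      have h2 : m.1 ≤ pc.1 := hmmin pc hpc (by rw [hpck]; exact hcge)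
      have hc : m.1 = c := by
        have h3 : c ≤ pc.1 := by rw [hpck]
        omega
      rw [← hc]
      exact PySem.Dict.getD_of_mem_items d (by simpa using hmmem) hnd 0

-- ===== VERDICT (by name: the statement is the Claim_ definition above) =====
theorem SlidingScaleFeePerContract_py_spec : Claim_equal_SlidingScaleFeePerContract_py := by
  intro scalesDict feeAbove qty _
  exact bridge (PySem.Dict.ofList scalesDict) (PySem.Dict.nodup_keys_ofList scalesDict)
    |qty| feeAbove
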